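-- pv_equiv track=rewrite | github.com/phueb/CHILDES-SRL | babybertsrl/converter.py | mask_one_element
-- ===== SOURCE A (Python) =====
-- from typing import Iterator, List, Tuple, Union
--
-- def mask_one_element(elements: List[str],
--                      masked_id: int,
--                      ) -> Tuple[List[str], List[int]]:
--
--     masked = ['[MASK]' if i == masked_id else elements[i] for i in range(len(elements))]
--     mask = [1 if i == masked_id else 0 for i in range(len(elements))]
--
--     if all([x == 0 for x in mask]):
--         raise ValueError('Mask indicator contains zeros only. ')
--
--     return masked, mask
-- ===== SOURCE B (Python) =====
-- def mask_one_element(elements, masked_id):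
--     n = len(elements)
--     if not 0 <= masked_id < n:
--         raise ValueError('Mask indicator contains zeros only. ')
--     masked = elements[:masked_id] + ['[MASK]'] + elements[masked_id + 1:]
--     mask = [0] * masked_id + [1] + [0] * (n - masked_id - 1)
--     return masked, mask
-- ===== Notes on version B (the rewrite author's own statement) =====
-- stated objective: alternative
-- what changed: Replaces the per-index conditional comprehensions and the post-hoc all-zeros scan with an up-front bounds check and construction by slice/replicate concatenation (prefix + ['[MASK]'] + suffix), with no per-element index comparison at all.
import Mathlib
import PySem

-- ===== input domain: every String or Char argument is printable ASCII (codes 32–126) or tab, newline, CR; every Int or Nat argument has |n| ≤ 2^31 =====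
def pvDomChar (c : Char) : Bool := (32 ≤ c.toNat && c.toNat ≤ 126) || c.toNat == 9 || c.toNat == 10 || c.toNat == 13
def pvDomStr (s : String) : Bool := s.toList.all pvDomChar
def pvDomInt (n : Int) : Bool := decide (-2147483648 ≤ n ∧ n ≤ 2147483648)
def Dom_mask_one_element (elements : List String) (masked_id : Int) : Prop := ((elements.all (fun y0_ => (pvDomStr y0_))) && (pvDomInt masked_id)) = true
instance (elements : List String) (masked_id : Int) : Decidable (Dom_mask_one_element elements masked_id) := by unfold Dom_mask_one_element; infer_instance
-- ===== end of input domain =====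

-- B builds both outputs by slice/replicate concatenation (prefix ++ ['[MASK]'] ++ suffix) after an up-front
-- bounds check, instead of A's per-index conditional comprehensions plus a post-hoc all-zeros scan (alternative).

-- ===== PORT A =====
def mask_one_element (elements : List String) (masked_id : Int) : List String × List Int :=
  let masked := (PySem.List.pyRange 0 elements.length 1).map
      (fun i => if i == masked_id then "[MASK]" else PySem.List.pyGetD elements i "")
  let mask := (PySem.List.pyRange 0 elements.length 1).map
      (fun i => if i == masked_id then (1 : Int) else 0)
  -- Python then raises ValueError iff every mask entry is 0; those inputs are outside Pre_
  (masked, mask)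

-- ===== PORT B =====
def mask_one_element_alt (elements : List String) (masked_id : Int) : List String × List Int :=
  let n : Int := elements.length
  -- Source B first raises ValueError unless 0 <= masked_id < n; those inputs are outside Pre_
  let masked := PySem.List.slice elements none (some masked_id)
      ++ ["[MASK]"]
      ++ PySem.List.slice elements (some (masked_id + 1)) none
  let mask := List.replicate masked_id.toNat (0 : Int)
      ++ [1]
      ++ List.replicate (n - masked_id - 1).toNat (0 : Int)
  (masked, mask)

-- ===== PRECONDITION & SPEC =====
-- A raises ValueError exactly when masked_id hits no index, i.e. unless 0 <= masked_id < len(elements)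
def Pre_mask_one_element (elements : List String) (masked_id : Int) : Prop :=
  0 ≤ masked_id ∧ masked_id < elements.length
instance (elements : List String) (masked_id : Int) : Decidable (Pre_mask_one_element elements masked_id) := by unfold Pre_mask_one_element; infer_instance
def pvWitness_mask_one_element : List String × Int := (["a", "b", "c"], 1)
def Spec_mask_one_element (elements : List String) (masked_id : Int) (out : List String × List Int) : Prop := out = mask_one_element_alt elements masked_id
instance (elements : List String) (masked_id : Int) (out : List String × List Int) : Decidable (Spec_mask_one_element elements masked_id out) := by unfold Spec_mask_one_element; infer_instance

-- ===== CLAIM =====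
def Claim_equal_mask_one_element : Prop := ∀ (elements : List String) (masked_id : Int), Dom_mask_one_element elements masked_id → Pre_mask_one_element elements masked_id → Spec_mask_one_element elements masked_id (mask_one_element elements masked_id)

-- ===== LEMMAS AND PROOFS =====
theorem map_pyRange_eq_set {α : Type} (xs : List α) (m : Int) (v : α) (d : α)
    (h0 : 0 ≤ m) (h1 : m < xs.length) :
    (PySem.List.pyRange 0 xs.length 1).map
        (fun i => if i == m then v else PySem.List.pyGetD xs i d)
      = xs.set m.toNat v := by
  apply List.ext_getElem
  · simp [PySem.List.length_pyRange_one]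
  · intro k hk1 hk2
    have hk : k < xs.length := by
      simpa [PySem.List.length_pyRange_one] using hk1
    rw [List.getElem_map, PySem.List.getElem_pyRange_one, List.getElem_set]
    by_cases hkm : (k : Int) = m
    · simp [hkm, show m.toNat = k from by omega]
    · have hne : m.toNat ≠ k := by omega
      simp [hne, hkm, List.getElem?_eq_getElem hk]

theorem mask_a_eq_replicate_set (n : Nat) (m : Int) (h0 : 0 ≤ m) (h1 : m < (n : Int)) :
    (PySem.List.pyRange 0 n 1).map (fun i => if i == m then (1 : Int) else 0)
      = (List.replicate n (0 : Int)).set m.toNat 1 := by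
  apply List.ext_getElem
  · simp [PySem.List.length_pyRange_one]
  · intro k hk1 hk2
    have hk : k < n := by simpa [PySem.List.length_pyRange_one] using hk1
    rw [List.getElem_map, PySem.List.getElem_pyRange_one, List.getElem_set]
    by_cases hkm : (k : Int) = m
    · simp [hkm, show m.toNat = k by omega]
    · have : m.toNat ≠ k := by omega
      simp [this, hkm, List.getElem_replicate]

-- ===== VERDICT =====
theorem mask_one_element_spec : Claim_equal_mask_one_element := by
  intro elements masked_id _ hpre
  unfold Spec_mask_one_element mask_one_element mask_one_element_alt
  obtain ⟨h0, h1⟩ := hpre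
  have hmn : masked_id.toNat < elements.length := by omega
  refine Prod.ext ?_ ?_
  · show (PySem.List.pyRange 0 elements.length 1).map _
        = PySem.List.slice elements none (some masked_id) ++ _ ++ PySem.List.slice elements (some (masked_id + 1)) none
    rw [map_pyRange_eq_set elements masked_id "[MASK]" "" h0 h1,
        List.set_eq_take_cons_drop _ hmn]
    have e1 : masked_id = ((masked_id.toNat : Nat) : Int) := by omega
    rw [e1, PySem.List.slice_to_natCast,
        show ((masked_id.toNat : Int) + 1) = ((masked_id.toNat + 1 : Nat) : Int) by omega,
        PySem.List.slice_from_natCast]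
    simp
    rw [show (max masked_id 0).toNat = masked_id.toNat by omega]
  · show (PySem.List.pyRange 0 elements.length 1).map _
        = List.replicate masked_id.toNat (0 : Int) ++ _ ++ List.replicate ((elements.length : Int) - masked_id - 1).toNat (0 : Int)
    rw [mask_a_eq_replicate_set elements.length masked_id h0 h1,
        List.set_eq_take_cons_drop _ (by simpa using hmn)]
    rw [List.take_replicate, List.drop_replicate,
        show min masked_id.toNat elements.length = masked_id.toNat by omega,
        show elements.length - (masked_id.toNat + 1)
            = ((elements.length : Int) - masked_id - 1).toNat by omega]
    simp
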